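-- pv_equiv track=rewrite | github.com/sumeshsg/Data-Structure-in-Python | graph/min_max_island_size.py | min_or_max_island
-- ===== SOURCE A (Python) =====
-- def min_or_max_island(grid, is_max=True):
--     visited = set()
--     count = 0
--     for i in range(0, len(grid)):
--         for j in range(0, len(grid[0])):
--             result = explore(grid, i, j, visited)
--             if result:
--                 count = result if count == 0 else count
--                 if is_max:
--                     count = max(result, count)
--                 else:
--                     count = min(result, count)
--
--     return count
--
-- def explore(grid, i, j, visited):
--     if not (0 <= i < len(grid) and 0 <= j < len(grid[0])):
--         return False
--     if grid[i][j] == 'w':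
--         return False
--     if (i, j) in visited:
--         return False
--     cnt = 1
--     visited.add((i, j))
--     cnt += explore(grid, i - 1, j, visited)
--     cnt += explore(grid, i + 1, j, visited)
--     cnt += explore(grid, i, j - 1, visited)
--     cnt += explore(grid, i, j + 1, visited)
--     return cnt
-- ===== SOURCE B (Python) =====
-- def min_or_max_island(grid, is_max=True):
--     visited = set()
--     count = 0
--     for i in range(0, len(grid)):
--         for j in range(0, len(grid[0])):
--             result = island_size(grid, i, j, visited)
--             if result:
--                 count = result if count == 0 else count
--                 if is_max:
--                     count = max(result, count)
--                 else:
--                     count = min(result, count)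
--     return count
--
--
-- def island_size(grid, i, j, visited):
--     size = 0
--     stack = [(i, j)]
--     while stack:
--         r, c = stack.pop()
--         if not (0 <= r < len(grid) and 0 <= c < len(grid[0])):
--             continue
--         if grid[r][c] == 'w':
--             continue
--         if (r, c) in visited:
--             continue
--         visited.add((r, c))
--         size += 1
--         stack.extend([(r, c + 1), (r, c - 1), (r + 1, c), (r - 1, c)])
--     return size
-- ===== Notes on version B (the rewrite author's own statement) =====
-- stated objective: alternative
-- what changed: The recursive DFS helper `explore` is replaced by an iterative flood-fill with an explicit stack and a local size counter (no recursion); the cell scan and min/max aggregation are unchanged.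
import Mathlib
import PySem

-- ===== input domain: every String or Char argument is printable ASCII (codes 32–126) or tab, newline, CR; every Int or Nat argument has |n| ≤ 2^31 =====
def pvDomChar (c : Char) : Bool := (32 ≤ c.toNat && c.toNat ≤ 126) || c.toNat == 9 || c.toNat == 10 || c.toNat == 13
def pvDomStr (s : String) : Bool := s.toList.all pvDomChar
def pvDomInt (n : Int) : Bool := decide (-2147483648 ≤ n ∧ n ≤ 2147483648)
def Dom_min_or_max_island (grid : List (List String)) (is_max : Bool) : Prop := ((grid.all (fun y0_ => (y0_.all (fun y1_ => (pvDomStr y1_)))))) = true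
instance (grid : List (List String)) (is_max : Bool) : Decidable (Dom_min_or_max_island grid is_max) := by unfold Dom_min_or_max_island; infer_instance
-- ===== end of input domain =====

-- B replaces A's recursive flood-fill with an explicit stack-based flood-fill (no recursion); same scan and aggregation.

-- shared cell access helper: grid[i][j] (both Pythons index the same way; guarded by the bounds check)
def pvCell (grid : List (List String)) (i j : Int) : String :=
  (PySem.List.pyGet? ((PySem.List.pyGet? grid i).getD []) j).getD ""

-- all in-bounds cell coordinates; used by A's fuel bound and by the termination measure of B's loop
def pvAllCells (grid : List (List String)) : List (Int × Int) :=
  (List.range grid.length).flatMap (fun a =>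
    (List.range (grid.headD []).length).map (fun b => (Int.ofNat a, Int.ofNat b)))

-- three small facts the ports' own totality arguments need (cited by decreasing_by), so they stay above
theorem pvFilterLengthLe {α : Type} (l : List α) (p q : α → Bool)
    (himp : ∀ x, q x = true → p x = true) :
    (l.filter q).length ≤ (l.filter p).length := by
  induction l with
  | nil => simp
  | cons a l ih =>
    simp only [List.filter_cons]
    cases hqa : q a with
    | true => rw [himp a hqa]; simpa using ih
    | false => cases p a <;> simp <;> omega

theorem pvFilterLengthLt {α : Type} (l : List α) (p q : α → Bool)
    (himp : ∀ x, q x = true → p x = true) (x : α) (hx : x ∈ l)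
    (hp : p x = true) (hq : q x = false) :
    (l.filter q).length < (l.filter p).length := by
  induction l with
  | nil => cases hx
  | cons a l ih =>
    rcases List.mem_cons.mp hx with rfl | hmem
    · simp only [List.filter_cons, hp, hq]
      exact Nat.lt_succ_of_le (pvFilterLengthLe l p q himp)
    · simp only [List.filter_cons]
      cases hqa : q a with
      | true =>
        rw [himp a hqa]
        exact Nat.succ_lt_succ (ih hmem)
      | false =>
        cases hpa : p a with
        | true => exact Nat.lt_succ_of_lt (ih hmem)
        | false => exact ih hmem

theorem pvMemAllCells (grid : List (List String)) (r c : Int)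
    (h : 0 ≤ r ∧ r < (grid.length : Int) ∧ 0 ≤ c ∧ c < ((grid.headD []).length : Int)) :
    (r, c) ∈ pvAllCells grid := by
  obtain ⟨h1, h2, h3, h4⟩ := h
  have hr : r.toNat ∈ List.range grid.length := List.mem_range.mpr (by omega)
  have hc : c.toNat ∈ List.range (grid.headD []).length := List.mem_range.mpr (by omega)
  have he : (Int.ofNat r.toNat, Int.ofNat c.toNat) = (r, c) := by
    simp only [Prod.mk.injEq, Int.ofNat_eq_natCast]; omega
  rw [pvAllCells]
  exact List.mem_flatMap.mpr ⟨r.toNat, hr, List.mem_map.mpr ⟨c.toNat, hc, he⟩⟩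

theorem pvMeasureAddLt (grid : List (List String)) (visited : PySem.Set (Int × Int)) (r c : Int)
    (hb : 0 ≤ r ∧ r < (grid.length : Int) ∧ 0 ≤ c ∧ c < ((grid.headD []).length : Int))
    (hv : PySem.Set.contains visited (r, c) = false) :
    ((pvAllCells grid).filter (fun p => !PySem.Set.contains (PySem.Set.add visited (r, c)) p)).length <
      ((pvAllCells grid).filter (fun p => !PySem.Set.contains visited p)).length := by
  have hadd : PySem.Set.contains (PySem.Set.add visited (r, c)) (r, c) = true := by
    rw [PySem.Set.contains_iff]
    exact (PySem.Set.mem_add _ _ _).mpr (Or.inr rfl)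
  apply pvFilterLengthLt _ _ _ ?_ (r, c) (pvMemAllCells grid r c hb) (by simp only [Bool.not_eq_true']; exact hv)
    (by simp only [Bool.not_eq_false']; exact hadd)
  intro x hx
  simp only [Bool.not_eq_true'] at hx ⊢
  by_contra h
  rw [Bool.not_eq_false, PySem.Set.contains_iff] at h
  rw [← Bool.not_eq_true, PySem.Set.contains_iff] at hx
  exact hx ((PySem.Set.mem_add _ _ _).mpr (Or.inl h))

-- ===== PORT A =====
-- recursive DFS `explore`; the fuel argument is only a totality guard (the proofs show it never runs out)
def exploreA (grid : List (List String)) (fuel : Nat) (i j : Int)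
    (visited : PySem.Set (Int × Int)) : Int × PySem.Set (Int × Int) :=
  match fuel with
  | 0 => (0, visited)
  | Nat.succ f =>
    if ¬(0 ≤ i ∧ i < (grid.length : Int) ∧ 0 ≤ j ∧ j < ((grid.headD []).length : Int)) then
      (0, visited)
    else if pvCell grid i j == "w" then (0, visited)
    else if PySem.Set.contains visited (i, j) then (0, visited)
    else
      let v0 := PySem.Set.add visited (i, j)
      let r1 := exploreA grid f (i - 1) j v0
      let r2 := exploreA grid f (i + 1) j r1.2
      let r3 := exploreA grid f i (j - 1) r2.2
      let r4 := exploreA grid f i (j + 1) r3.2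
      (1 + r1.1 + r2.1 + r3.1 + r4.1, r4.2)

def min_or_max_island (grid : List (List String)) (is_max : Bool) : Int :=
  ((PySem.List.pyRange 0 (grid.length : Int) 1).foldl (fun (st : Int × PySem.Set (Int × Int)) i =>
    (PySem.List.pyRange 0 ((grid.headD []).length : Int) 1).foldl (fun st j =>
      let r := exploreA grid ((pvAllCells grid).length + 1) i j st.2
      if r.1 ≠ 0 then
        let c := if st.1 = 0 then r.1 else st.1
        (if is_max then max r.1 c else min r.1 c, r.2)
      else (st.1, r.2)) st) (0, PySem.Set.empty)).1

-- ===== PORT B =====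
-- iterative flood-fill: the `while stack` loop pops the top cell; it terminates because each step
-- either marks a new cell (fewer unvisited cells) or shortens the stack with visited unchanged
def fillB (grid : List (List String)) (stack : List (Int × Int))
    (visited : PySem.Set (Int × Int)) (size : Int) : Int × PySem.Set (Int × Int) :=
  match stack with
  | [] => (size, visited)
  | (r, c) :: rest =>
    if ¬(0 ≤ r ∧ r < (grid.length : Int) ∧ 0 ≤ c ∧ c < ((grid.headD []).length : Int)) then
      fillB grid rest visited size
    else if pvCell grid r c == "w" then fillB grid rest visited size
    else if PySem.Set.contains visited (r, c) then fillB grid rest visited size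
    else
      fillB grid ((r - 1, c) :: (r + 1, c) :: (r, c - 1) :: (r, c + 1) :: rest)
        (PySem.Set.add visited (r, c)) (size + 1)
  termination_by (((pvAllCells grid).filter (fun p => !PySem.Set.contains visited p)).length, stack.length)
  decreasing_by
    · exact Prod.Lex.right _ (by simp)
    · exact Prod.Lex.right _ (by simp)
    · exact Prod.Lex.right _ (by simp)
    · rename_i hb hw hv
      exact Prod.Lex.left _ _
        (pvMeasureAddLt grid visited r c (not_not.mp hb) (Bool.not_eq_true _ ▸ eq_false_of_ne_true hv))

def min_or_max_island_alt (grid : List (List String)) (is_max : Bool) : Int :=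
  ((PySem.List.pyRange 0 (grid.length : Int) 1).foldl (fun (st : Int × PySem.Set (Int × Int)) i =>
    (PySem.List.pyRange 0 ((grid.headD []).length : Int) 1).foldl (fun st j =>
      let r := fillB grid [(i, j)] st.2 0
      if r.1 ≠ 0 then
        let c := if st.1 = 0 then r.1 else st.1
        (if is_max then max r.1 c else min r.1 c, r.2)
      else (st.1, r.2)) st) (0, PySem.Set.empty)).1

-- ===== PRECONDITION & SPEC =====
-- Pre_ excludes exactly the ragged grids on which Python A raises IndexError: the scan indexes every
-- row at every column j < len(grid[0]), so a row shorter than grid[0] makes A (and B) raise.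
def Pre_min_or_max_island (grid : List (List String)) (is_max : Bool) : Prop :=
  ∀ row ∈ grid, (grid.headD []).length ≤ row.length
instance (grid : List (List String)) (is_max : Bool) : Decidable (Pre_min_or_max_island grid is_max) := by
  unfold Pre_min_or_max_island; infer_instance

def pvWitness_min_or_max_island : List (List String) × Bool := ([["l", "w"], ["l", "l"]], true)

def Spec_min_or_max_island (grid : List (List String)) (is_max : Bool) (out : Int) : Prop := out = min_or_max_island_alt grid is_max
instance (grid : List (List String)) (is_max : Bool) (out : Int) : Decidable (Spec_min_or_max_island grid is_max out) := by unfold Spec_min_or_max_island; infer_instance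

-- ===== CLAIM (what is proved, stated in full; the proofs are below) =====
def Claim_equal_min_or_max_island : Prop := ∀ (grid : List (List String)) (is_max : Bool), Dom_min_or_max_island grid is_max → Pre_min_or_max_island grid is_max → Spec_min_or_max_island grid is_max (min_or_max_island grid is_max)

-- ===== LEMMAS AND PROOFS =====

-- exploreA never removes cells from visited, so the count of unvisited cells cannot grow
theorem pvExploreMeasureLe (grid : List (List String)) :
    ∀ (fuel : Nat) (i j : Int) (v : PySem.Set (Int × Int)),
    ((pvAllCells grid).filter (fun p => !PySem.Set.contains (exploreA grid fuel i j v).2 p)).length ≤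
      ((pvAllCells grid).filter (fun p => !PySem.Set.contains v p)).length := by
  intro fuel
  induction fuel with
  | zero => intro i j v; rw [exploreA]
  | succ f ih =>
    intro i j v
    rw [exploreA]
    by_cases hb : 0 ≤ i ∧ i < (grid.length : Int) ∧ 0 ≤ j ∧ j < ((grid.headD []).length : Int)
    · rw [if_neg (not_not_intro hb)]
      by_cases hw : (pvCell grid i j == "w") = true
      · rw [if_pos hw]
      · rw [if_neg hw]
        by_cases hvm : PySem.Set.contains v (i, j) = true
        · rw [if_pos hvm]
        · rw [if_neg hvm]
          dsimp only
          refine le_trans (ih _ _ _) (le_trans (ih _ _ _) (le_trans (ih _ _ _)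
            (le_trans (ih _ _ _) ?_)))
          exact le_of_lt (pvMeasureAddLt grid v i j hb (eq_false_of_ne_true hvm))
    · rw [if_pos hb]

-- the simulation: popping one cell off B's stack performs exactly one recursive explore of A
theorem pvSim (grid : List (List String)) :
    ∀ (fuel : Nat) (v : PySem.Set (Int × Int)),
    ((pvAllCells grid).filter (fun p => !PySem.Set.contains v p)).length < fuel →
    ∀ (i j : Int) (s : List (Int × Int)) (n : Int),
    fillB grid ((i, j) :: s) v n =
      fillB grid s (exploreA grid fuel i j v).2 (n + (exploreA grid fuel i j v).1) := by
  intro fuel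
  induction fuel with
  | zero => intro v hv; omega
  | succ f ih =>
    intro v hv i j s n
    rw [exploreA, fillB]
    by_cases hb : 0 ≤ i ∧ i < (grid.length : Int) ∧ 0 ≤ j ∧ j < ((grid.headD []).length : Int)
    · rw [if_neg (not_not_intro hb), if_neg (not_not_intro hb)]
      by_cases hw : (pvCell grid i j == "w") = true
      · rw [if_pos hw, if_pos hw]
        dsimp only
        rw [Int.add_zero]
      · rw [if_neg hw, if_neg hw]
        by_cases hvm : PySem.Set.contains v (i, j) = true
        · rw [if_pos hvm, if_pos hvm]
          dsimp only
          rw [Int.add_zero]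
        · rw [if_neg hvm, if_neg hvm]
          dsimp only
          have hm0 := pvMeasureAddLt grid v i j hb (eq_false_of_ne_true hvm)
          have h1 := pvExploreMeasureLe grid f (i - 1) j (PySem.Set.add v (i, j))
          have h2 := pvExploreMeasureLe grid f (i + 1) j
            (exploreA grid f (i - 1) j (PySem.Set.add v (i, j))).2
          have h3 := pvExploreMeasureLe grid f i (j - 1)
            (exploreA grid f (i + 1) j (exploreA grid f (i - 1) j (PySem.Set.add v (i, j))).2).2
          rw [ih _ (by omega), ih _ (by omega), ih _ (by omega), ih _ (by omega)]
          congr 1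
          ring
    · rw [if_pos hb, if_pos hb]
      dsimp only
      rw [Int.add_zero]

-- starting B's loop from a single seed cell computes exactly A's explore from that cell
theorem pvCellEq (grid : List (List String)) (v : PySem.Set (Int × Int)) (i j : Int) :
    fillB grid [(i, j)] v 0 = exploreA grid ((pvAllCells grid).length + 1) i j v := by
  rw [pvSim grid ((pvAllCells grid).length + 1) v
    (Nat.lt_succ_of_le (List.length_filter_le _ _)) i j [] 0, fillB]
  simp

-- ===== VERDICT (by name: the statement is the Claim_ definition above) =====
theorem min_or_max_island_spec : Claim_equal_min_or_max_island := by
  intro grid is_max _ _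
  unfold Spec_min_or_max_island min_or_max_island min_or_max_island_alt
  simp only [pvCellEq]
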